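-- pv_equiv track=rewrite | github.com/hg90zxt/near-market-agent | autobot.py | get_proposal
-- ===== SOURCE A (Python) =====
-- from typing import Any, Dict, List, Optional, Tuple
--
-- PROPOSAL_TEMPLATES = {
--     "code": (
--         "Expert AI agent specializing in blockchain development and NEAR Protocol. "
--         "I deliver clean, tested, production-ready code with documentation. "
--         "Proficient in Rust, Python, JavaScript, NEAR SDK, and AI agent development."
--     ),
--     "docs": (
--         "Technical writer and documentation specialist for Web3. "
--         "I create clear, structured documentation with examples and best practices. "
--         "Experienced with NEAR Protocol, AI agents, and developer tooling."
--     ),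
--     "research": (
--         "AI research agent with deep analytical capabilities. "
--         "I provide comprehensive, well-sourced research with actionable insights. "
--         "Specialized in blockchain ecosystems, AI/ML applications, and market analysis."
--     ),
--     "marketing": (
--         "Marketing and content creation specialist for Web3/blockchain. "
--         "I craft compelling narratives, engaging copy, and social media content. "
--         "Experienced in NEAR Protocol ecosystem promotion and community building."
--     ),
--     "near": (
--         "NEAR Protocol specialist with deep ecosystem knowledge. "
--         "I understand NEAR's architecture, tooling, and community standards. "
--         "Ready to deliver high-quality work that meets NEAR ecosystem requirements."
--     ),
--     "default": (
--         "Expert AI agent delivering high-quality work on market.near.ai. "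
--         "Specialized in NEAR Protocol, blockchain development, technical writing, "
--         "AI agent architecture, and research. Fast, reliable, professional delivery."
--     ),
-- }
--
-- def get_proposal(tags: List[str]) -> str:
--     tag_lower = {t.lower() for t in (tags or [])}
--     if tag_lower & {"rust", "python", "javascript", "solidity", "code", "smart-contract", "nearai", "agent", "sdk", "api"}:
--         return PROPOSAL_TEMPLATES["code"]
--     if tag_lower & {"docs", "documentation", "technical-writing", "writing", "content", "tutorial"}:
--         return PROPOSAL_TEMPLATES["docs"]
--     if tag_lower & {"research", "analysis", "data", "report", "survey"}:
--         return PROPOSAL_TEMPLATES["research"]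
--     if tag_lower & {"marketing", "social", "twitter", "x", "community", "promotion", "tweet"}:
--         return PROPOSAL_TEMPLATES["marketing"]
--     if tag_lower & {"near", "blockchain", "web3", "crypto", "defi", "nft"}:
--         return PROPOSAL_TEMPLATES["near"]
--     return PROPOSAL_TEMPLATES["default"]
-- ===== SOURCE B (Python) =====
-- PROPOSAL_TEMPLATES = {
--     "code": (
--         "Expert AI agent specializing in blockchain development and NEAR Protocol. "
--         "I deliver clean, tested, production-ready code with documentation. "
--         "Proficient in Rust, Python, JavaScript, NEAR SDK, and AI agent development."
--     ),
--     "docs": (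
--         "Technical writer and documentation specialist for Web3. "
--         "I create clear, structured documentation with examples and best practices. "
--         "Experienced with NEAR Protocol, AI agents, and developer tooling."
--     ),
--     "research": (
--         "AI research agent with deep analytical capabilities. "
--         "I provide comprehensive, well-sourced research with actionable insights. "
--         "Specialized in blockchain ecosystems, AI/ML applications, and market analysis."
--     ),
--     "marketing": (
--         "Marketing and content creation specialist for Web3/blockchain. "
--         "I craft compelling narratives, engaging copy, and social media content. "
--         "Experienced in NEAR Protocol ecosystem promotion and community building."
--     ),
--     "near": (
--         "NEAR Protocol specialist with deep ecosystem knowledge. "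
--         "I understand NEAR's architecture, tooling, and community standards. "
--         "Ready to deliver high-quality work that meets NEAR ecosystem requirements."
--     ),
--     "default": (
--         "Expert AI agent delivering high-quality work on market.near.ai. "
--         "Specialized in NEAR Protocol, blockchain development, technical writing, "
--         "AI agent architecture, and research. Fast, reliable, professional delivery."
--     ),
-- }
--
-- # category priority order with their (disjoint) keyword sets
-- _CATEGORY_KEYWORDS = [
--     ("code", ["rust", "python", "javascript", "solidity", "code", "smart-contract", "nearai", "agent", "sdk", "api"]),
--     ("docs", ["docs", "documentation", "technical-writing", "writing", "content", "tutorial"]),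
--     ("research", ["research", "analysis", "data", "report", "survey"]),
--     ("marketing", ["marketing", "social", "twitter", "x", "community", "promotion", "tweet"]),
--     ("near", ["near", "blockchain", "web3", "crypto", "defi", "nft"]),
-- ]
--
-- # keyword -> priority index (keywords are disjoint across categories, so this is unambiguous)
-- _KEYWORD_PRIORITY = {kw: i for i, (_, kws) in enumerate(_CATEGORY_KEYWORDS) for kw in kws}
--
-- # template at each priority index; index 5 = no keyword matched
-- _PRIORITY_TEMPLATES = [PROPOSAL_TEMPLATES[name] for name, _ in _CATEGORY_KEYWORDS] + [PROPOSAL_TEMPLATES["default"]]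
--
--
-- def get_proposal(tags):
--     best = 5
--     for t in (tags or []):
--         best = min(best, _KEYWORD_PRIORITY.get(t.lower(), 5))
--     return _PRIORITY_TEMPLATES[best]
-- ===== Notes on version B (the rewrite author's own statement) =====
-- stated objective: alternative
-- what changed: Replaces the five ordered set-intersection tests with a single pass over the tags that looks each lowered tag up in a precomputed keyword->priority dict and keeps the minimum priority index, then indexes a priority-ordered template list.
import Mathlib
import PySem

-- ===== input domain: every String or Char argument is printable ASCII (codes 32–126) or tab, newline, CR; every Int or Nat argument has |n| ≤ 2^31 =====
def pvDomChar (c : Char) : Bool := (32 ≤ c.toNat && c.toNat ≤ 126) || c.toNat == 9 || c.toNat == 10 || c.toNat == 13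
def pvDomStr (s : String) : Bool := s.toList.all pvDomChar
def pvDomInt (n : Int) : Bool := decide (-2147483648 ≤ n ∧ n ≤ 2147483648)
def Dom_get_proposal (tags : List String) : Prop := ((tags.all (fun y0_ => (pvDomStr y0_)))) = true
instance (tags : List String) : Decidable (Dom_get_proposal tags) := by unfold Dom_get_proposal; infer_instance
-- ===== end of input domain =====

-- B replaces A's five ordered set-intersection tests by one pass over the tags with a
-- keyword->priority dictionary, tracking the minimum priority index (objective: alternative decomposition).

-- ===== PORT A =====
def PROPOSAL_TEMPLATES : PySem.Dict String String := PySem.Dict.ofList [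
  ("code", "Expert AI agent specializing in blockchain development and NEAR Protocol. I deliver clean, tested, production-ready code with documentation. Proficient in Rust, Python, JavaScript, NEAR SDK, and AI agent development."),
  ("docs", "Technical writer and documentation specialist for Web3. I create clear, structured documentation with examples and best practices. Experienced with NEAR Protocol, AI agents, and developer tooling."),
  ("research", "AI research agent with deep analytical capabilities. I provide comprehensive, well-sourced research with actionable insights. Specialized in blockchain ecosystems, AI/ML applications, and market analysis."),
  ("marketing", "Marketing and content creation specialist for Web3/blockchain. I craft compelling narratives, engaging copy, and social media content. Experienced in NEAR Protocol ecosystem promotion and community building."),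
  ("near", "NEAR Protocol specialist with deep ecosystem knowledge. I understand NEAR's architecture, tooling, and community standards. Ready to deliver high-quality work that meets NEAR ecosystem requirements."),
  ("default", "Expert AI agent delivering high-quality work on market.near.ai. Specialized in NEAR Protocol, blockchain development, technical writing, AI agent architecture, and research. Fast, reliable, professional delivery.")]

def kwCode : PySem.Set String := PySem.Set.ofList ["rust", "python", "javascript", "solidity", "code", "smart-contract", "nearai", "agent", "sdk", "api"]
def kwDocs : PySem.Set String := PySem.Set.ofList ["docs", "documentation", "technical-writing", "writing", "content", "tutorial"]
def kwResearch : PySem.Set String := PySem.Set.ofList ["research", "analysis", "data", "report", "survey"]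
def kwMarketing : PySem.Set String := PySem.Set.ofList ["marketing", "social", "twitter", "x", "community", "promotion", "tweet"]
def kwNear : PySem.Set String := PySem.Set.ofList ["near", "blockchain", "web3", "crypto", "defi", "nft"]

def get_proposal (tags : List String) : String :=
  let tag_lower : PySem.Set String := PySem.Set.ofList (tags.map PySem.Str.lower)
  if PySem.Set.inter tag_lower kwCode ≠ [] then PROPOSAL_TEMPLATES.getD "code" ""
  else if PySem.Set.inter tag_lower kwDocs ≠ [] then PROPOSAL_TEMPLATES.getD "docs" ""
  else if PySem.Set.inter tag_lower kwResearch ≠ [] then PROPOSAL_TEMPLATES.getD "research" ""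
  else if PySem.Set.inter tag_lower kwMarketing ≠ [] then PROPOSAL_TEMPLATES.getD "marketing" ""
  else if PySem.Set.inter tag_lower kwNear ≠ [] then PROPOSAL_TEMPLATES.getD "near" ""
  else PROPOSAL_TEMPLATES.getD "default" ""

-- ===== PORT B =====
-- keyword -> priority index (the comprehension over _CATEGORY_KEYWORDS, flattened)
def kwPriority : PySem.Dict String Nat := PySem.Dict.ofList [
  ("rust", 0), ("python", 0), ("javascript", 0), ("solidity", 0), ("code", 0), ("smart-contract", 0), ("nearai", 0), ("agent", 0), ("sdk", 0), ("api", 0),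
  ("docs", 1), ("documentation", 1), ("technical-writing", 1), ("writing", 1), ("content", 1), ("tutorial", 1),
  ("research", 2), ("analysis", 2), ("data", 2), ("report", 2), ("survey", 2),
  ("marketing", 3), ("social", 3), ("twitter", 3), ("x", 3), ("community", 3), ("promotion", 3), ("tweet", 3),
  ("near", 4), ("blockchain", 4), ("web3", 4), ("crypto", 4), ("defi", 4), ("nft", 4)]

-- template at each priority index; index 5 = no keyword matched
def priorityTemplates : List String :=
  [PROPOSAL_TEMPLATES.getD "code" "", PROPOSAL_TEMPLATES.getD "docs" "", PROPOSAL_TEMPLATES.getD "research" "",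
   PROPOSAL_TEMPLATES.getD "marketing" "", PROPOSAL_TEMPLATES.getD "near" "", PROPOSAL_TEMPLATES.getD "default" ""]

def get_proposal_alt (tags : List String) : String :=
  let best := tags.foldl (fun b t => min b (kwPriority.getD (PySem.Str.lower t) 5)) 5
  priorityTemplates.getD best ""

-- ===== PRECONDITION & SPEC =====
def Spec_get_proposal (tags : List String) (out : String) : Prop := out = get_proposal_alt tags
instance (tags : List String) (out : String) : Decidable (Spec_get_proposal tags out) := by unfold Spec_get_proposal; infer_instance

-- ===== CLAIM (what is proved, stated in full; the proofs are below) =====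
def Claim_equal_get_proposal : Prop := ∀ (tags : List String), Dom_get_proposal tags → Spec_get_proposal tags (get_proposal tags)

-- ===== LEMMAS AND PROOFS =====

-- priority of a (lowered) tag, as B looks it up
def prio (t : String) : Nat := kwPriority.getD t 5

set_option maxRecDepth 8192 in
lemma prio_of_mem_kwCode {t : String} (h : t ∈ kwCode) : prio t = 0 := by
  simp only [kwCode, PySem.Set.mem_ofList, List.mem_cons, List.not_mem_nil, or_false] at h
  rcases h with rfl|rfl|rfl|rfl|rfl|rfl|rfl|rfl|rfl|rfl <;> decide

set_option maxRecDepth 8192 in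
lemma prio_of_mem_kwDocs {t : String} (h : t ∈ kwDocs) : prio t = 1 := by
  simp only [kwDocs, PySem.Set.mem_ofList, List.mem_cons, List.not_mem_nil, or_false] at h
  rcases h with rfl|rfl|rfl|rfl|rfl|rfl <;> decide

set_option maxRecDepth 8192 in
lemma prio_of_mem_kwResearch {t : String} (h : t ∈ kwResearch) : prio t = 2 := by
  simp only [kwResearch, PySem.Set.mem_ofList, List.mem_cons, List.not_mem_nil, or_false] at h
  rcases h with rfl|rfl|rfl|rfl|rfl <;> decide

set_option maxRecDepth 8192 in
lemma prio_of_mem_kwMarketing {t : String} (h : t ∈ kwMarketing) : prio t = 3 := by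
  simp only [kwMarketing, PySem.Set.mem_ofList, List.mem_cons, List.not_mem_nil, or_false] at h
  rcases h with rfl|rfl|rfl|rfl|rfl|rfl|rfl <;> decide

set_option maxRecDepth 8192 in
lemma prio_of_mem_kwNear {t : String} (h : t ∈ kwNear) : prio t = 4 := by
  simp only [kwNear, PySem.Set.mem_ofList, List.mem_cons, List.not_mem_nil, or_false] at h
  rcases h with rfl|rfl|rfl|rfl|rfl|rfl <;> decide

set_option maxRecDepth 8192 in
lemma keys_kwPriority :
    kwPriority.items.map (fun p => p.1) = (kwCode ++ kwDocs ++ kwResearch ++ kwMarketing ++ kwNear : List String) := by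
  decide

lemma prio_of_not_mem {t : String}
    (h : t ∉ (kwCode ++ kwDocs ++ kwResearch ++ kwMarketing ++ kwNear : List String)) : prio t = 5 := by
  have hfind : kwPriority.items.find? (fun p => p.1 == t) = none := by
    rw [List.find?_eq_none]
    intro p hp hbeq
    refine h ?_
    rw [← keys_kwPriority]
    rw [beq_iff_eq] at hbeq
    exact hbeq ▸ List.mem_map.2 ⟨p, hp, rfl⟩
  simp [prio, PySem.Dict.getD, PySem.Dict.get?, hfind]

lemma prio_cases (t : String) :
    prio t = 5 ∨ t ∈ kwCode ∨ t ∈ kwDocs ∨ t ∈ kwResearch ∨ t ∈ kwMarketing ∨ t ∈ kwNear := by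
  by_cases h0 : t ∈ kwCode
  · exact Or.inr (Or.inl h0)
  by_cases h1 : t ∈ kwDocs
  · exact Or.inr (Or.inr (Or.inl h1))
  by_cases h2 : t ∈ kwResearch
  · exact Or.inr (Or.inr (Or.inr (Or.inl h2)))
  by_cases h3 : t ∈ kwMarketing
  · exact Or.inr (Or.inr (Or.inr (Or.inr (Or.inl h3))))
  by_cases h4 : t ∈ kwNear
  · exact Or.inr (Or.inr (Or.inr (Or.inr (Or.inr h4))))
  refine Or.inl (prio_of_not_mem ?_)
  simp only [List.mem_append, not_or]
  exact ⟨⟨⟨⟨h0, h1⟩, h2⟩, h3⟩, h4⟩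

-- fold characterization
lemma foldl_min_le_iff (L : List String) (b i : Nat) :
    L.foldl (fun a t => min a (prio t)) b ≤ i ↔ b ≤ i ∨ ∃ t ∈ L, prio t ≤ i := by
  induction L generalizing b with
  | nil => simp
  | cons x xs ih =>
    simp only [List.foldl_cons, ih, min_le_iff, List.mem_cons]
    constructor
    · rintro ((h|h)|⟨t, ht, hp⟩)
      · exact Or.inl h
      · exact Or.inr ⟨x, Or.inl rfl, h⟩
      · exact Or.inr ⟨t, Or.inr ht, hp⟩
    · rintro (h|⟨t, rfl|ht, hp⟩)
      · exact Or.inl (Or.inl h)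
      · exact Or.inl (Or.inr hp)
      · exact Or.inr ⟨t, ht, hp⟩

-- the set-intersection test of A, as an existential over the lowered tags
lemma inter_ne_nil_iff (L : List String) (s : PySem.Set String) :
    PySem.Set.inter (PySem.Set.ofList L) s ≠ [] ↔ ∃ t ∈ L, t ∈ s := by
  have hmem : ∀ y, y ∈ PySem.Set.inter (PySem.Set.ofList L) s ↔ y ∈ L ∧ y ∈ s := by
    intro y
    rw [PySem.Set.mem_inter, PySem.Set.mem_ofList]
  rw [← List.isEmpty_eq_false_iff, List.isEmpty_eq_false_iff_exists_mem]
  simp only [hmem]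

-- priorities below i < 5 force membership in an earlier keyword set
lemma exists_mem_of_prio_le {t : String} {i : Nat} (hi : i ≤ 4) (h : prio t ≤ i) :
    (t ∈ kwCode ∧ 0 ≤ i) ∨ (t ∈ kwDocs ∧ 1 ≤ i) ∨ (t ∈ kwResearch ∧ 2 ≤ i) ∨
    (t ∈ kwMarketing ∧ 3 ≤ i) ∨ (t ∈ kwNear ∧ 4 ≤ i) := by
  rcases prio_cases t with h5|hm|hm|hm|hm|hm
  · omega
  · exact Or.inl ⟨hm, Nat.zero_le i⟩
  · rw [prio_of_mem_kwDocs hm] at h; exact Or.inr (Or.inl ⟨hm, h⟩)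
  · rw [prio_of_mem_kwResearch hm] at h; exact Or.inr (Or.inr (Or.inl ⟨hm, h⟩))
  · rw [prio_of_mem_kwMarketing hm] at h; exact Or.inr (Or.inr (Or.inr (Or.inl ⟨hm, h⟩)))
  · rw [prio_of_mem_kwNear hm] at h; exact Or.inr (Or.inr (Or.inr (Or.inr ⟨hm, h⟩)))

theorem get_proposal_spec_aux (tags : List String) : get_proposal tags = get_proposal_alt tags := by
  unfold get_proposal get_proposal_alt
  simp only []
  set L := tags.map PySem.Str.lower with hL
  have hfold : tags.foldl (fun b t => min b (kwPriority.getD (PySem.Str.lower t) 5)) 5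
      = L.foldl (fun b t => min b (prio t)) 5 := by
    rw [hL, List.foldl_map]
    rfl
  rw [hfold]
  set m := L.foldl (fun b t => min b (prio t)) 5 with hm
  have hiff : ∀ i, m ≤ i ↔ 5 ≤ i ∨ ∃ t ∈ L, prio t ≤ i := by
    intro i
    rw [hm, foldl_min_le_iff]
  have hm5 : m ≤ 5 := (hiff 5).2 (Or.inl le_rfl)
  -- no tag below priority i (i ≤ 4) when none of the first i+1 keyword sets is hit
  by_cases h0 : ∃ t ∈ L, t ∈ kwCode
  · rw [if_pos ((inter_ne_nil_iff L kwCode).2 h0)]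
    obtain ⟨t, htL, htm⟩ := h0
    have : m ≤ 0 := (hiff 0).2 (Or.inr ⟨t, htL, le_of_eq (prio_of_mem_kwCode htm)⟩)
    have hm0 : m = 0 := by omega
    rw [hm0]
    rfl
  by_cases h1 : ∃ t ∈ L, t ∈ kwDocs
  · rw [if_neg (fun hc => h0 ((inter_ne_nil_iff L kwCode).1 hc)),
        if_pos ((inter_ne_nil_iff L kwDocs).2 h1)]
    obtain ⟨t, htL, htm⟩ := h1
    have hle : m ≤ 1 := (hiff 1).2 (Or.inr ⟨t, htL, le_of_eq (prio_of_mem_kwDocs htm)⟩)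
    have hgt : ¬ m ≤ 0 := by
      intro hc
      rcases (hiff 0).1 hc with h5|⟨u, huL, hup⟩
      · omega
      · rcases exists_mem_of_prio_le (by omega) hup with ⟨hu, _⟩|⟨_, hb⟩|⟨_, hb⟩|⟨_, hb⟩|⟨_, hb⟩
        · exact h0 ⟨u, huL, hu⟩
        all_goals omega
    have hm1 : m = 1 := by omega
    rw [hm1]
    rfl
  by_cases h2 : ∃ t ∈ L, t ∈ kwResearch
  · rw [if_neg (fun hc => h0 ((inter_ne_nil_iff L kwCode).1 hc)),
        if_neg (fun hc => h1 ((inter_ne_nil_iff L kwDocs).1 hc)),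
        if_pos ((inter_ne_nil_iff L kwResearch).2 h2)]
    obtain ⟨t, htL, htm⟩ := h2
    have hle : m ≤ 2 := (hiff 2).2 (Or.inr ⟨t, htL, le_of_eq (prio_of_mem_kwResearch htm)⟩)
    have hgt : ¬ m ≤ 1 := by
      intro hc
      rcases (hiff 1).1 hc with h5|⟨u, huL, hup⟩
      · omega
      · rcases exists_mem_of_prio_le (by omega) hup with ⟨hu, _⟩|⟨hu, _⟩|⟨_, hb⟩|⟨_, hb⟩|⟨_, hb⟩
        · exact h0 ⟨u, huL, hu⟩
        · exact h1 ⟨u, huL, hu⟩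
        all_goals omega
    have hm2 : m = 2 := by omega
    rw [hm2]
    rfl
  by_cases h3 : ∃ t ∈ L, t ∈ kwMarketing
  · rw [if_neg (fun hc => h0 ((inter_ne_nil_iff L kwCode).1 hc)),
        if_neg (fun hc => h1 ((inter_ne_nil_iff L kwDocs).1 hc)),
        if_neg (fun hc => h2 ((inter_ne_nil_iff L kwResearch).1 hc)),
        if_pos ((inter_ne_nil_iff L kwMarketing).2 h3)]
    obtain ⟨t, htL, htm⟩ := h3
    have hle : m ≤ 3 := (hiff 3).2 (Or.inr ⟨t, htL, le_of_eq (prio_of_mem_kwMarketing htm)⟩)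
    have hgt : ¬ m ≤ 2 := by
      intro hc
      rcases (hiff 2).1 hc with h5|⟨u, huL, hup⟩
      · omega
      · rcases exists_mem_of_prio_le (by omega) hup with ⟨hu, _⟩|⟨hu, _⟩|⟨hu, _⟩|⟨_, hb⟩|⟨_, hb⟩
        · exact h0 ⟨u, huL, hu⟩
        · exact h1 ⟨u, huL, hu⟩
        · exact h2 ⟨u, huL, hu⟩
        all_goals omega
    have hm3 : m = 3 := by omega
    rw [hm3]
    rfl
  by_cases h4 : ∃ t ∈ L, t ∈ kwNear
  · rw [if_neg (fun hc => h0 ((inter_ne_nil_iff L kwCode).1 hc)),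
        if_neg (fun hc => h1 ((inter_ne_nil_iff L kwDocs).1 hc)),
        if_neg (fun hc => h2 ((inter_ne_nil_iff L kwResearch).1 hc)),
        if_neg (fun hc => h3 ((inter_ne_nil_iff L kwMarketing).1 hc)),
        if_pos ((inter_ne_nil_iff L kwNear).2 h4)]
    obtain ⟨t, htL, htm⟩ := h4
    have hle : m ≤ 4 := (hiff 4).2 (Or.inr ⟨t, htL, le_of_eq (prio_of_mem_kwNear htm)⟩)
    have hgt : ¬ m ≤ 3 := by
      intro hc
      rcases (hiff 3).1 hc with h5|⟨u, huL, hup⟩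
      · omega
      · rcases exists_mem_of_prio_le (by omega) hup with ⟨hu, _⟩|⟨hu, _⟩|⟨hu, _⟩|⟨hu, _⟩|⟨_, hb⟩
        · exact h0 ⟨u, huL, hu⟩
        · exact h1 ⟨u, huL, hu⟩
        · exact h2 ⟨u, huL, hu⟩
        · exact h3 ⟨u, huL, hu⟩
        · omega
    have hm4 : m = 4 := by omega
    rw [hm4]
    rfl
  · rw [if_neg (fun hc => h0 ((inter_ne_nil_iff L kwCode).1 hc)),
        if_neg (fun hc => h1 ((inter_ne_nil_iff L kwDocs).1 hc)),
        if_neg (fun hc => h2 ((inter_ne_nil_iff L kwResearch).1 hc)),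
        if_neg (fun hc => h3 ((inter_ne_nil_iff L kwMarketing).1 hc)),
        if_neg (fun hc => h4 ((inter_ne_nil_iff L kwNear).1 hc))]
    have hgt : ¬ m ≤ 4 := by
      intro hc
      rcases (hiff 4).1 hc with h5|⟨u, huL, hup⟩
      · omega
      · rcases exists_mem_of_prio_le le_rfl hup with ⟨hu, _⟩|⟨hu, _⟩|⟨hu, _⟩|⟨hu, _⟩|⟨hu, _⟩
        · exact h0 ⟨u, huL, hu⟩
        · exact h1 ⟨u, huL, hu⟩
        · exact h2 ⟨u, huL, hu⟩
        · exact h3 ⟨u, huL, hu⟩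
        · exact h4 ⟨u, huL, hu⟩
    have hm5' : m = 5 := by omega
    rw [hm5']
    rfl

-- ===== VERDICT (by name: the statement is the Claim_ definition above) =====
theorem get_proposal_spec : Claim_equal_get_proposal := by
  intro tags _
  exact get_proposal_spec_aux tags
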